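-- pv_equiv track=rewrite | github.com/Luk9091/Notatki | TransmisjaSwiatlowodowa/Laby/Mgr/main.py | get_ref_level
-- ===== SOURCE A (Python) =====
-- def get_ref_level(data: list) -> int:
--     pick = False
--     for i in range(1, len(data)):
--         if pick is False:
--             if data[i-1] - data[i] > 10:
--                 pick = True
--         else:
--             if data[i-1] - data[i] < 1:
--                 return i
-- ===== SOURCE B (Python) =====
-- def get_ref_level(data: list) -> int:
--     diffs = [a - b for a, b in zip(data, data[1:])]
--     drops = [i for i, d in enumerate(diffs) if d > 10]
--     stables = [i for i, d in enumerate(diffs) if d < 1]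
--     if not drops:
--         return None
--     first = drops[0]
--     return next((i + 1 for i in stables if i > first), None)
-- ===== Notes on version B (the rewrite author's own statement) =====
-- stated objective: alternative
-- what changed: B materializes the adjacent-difference list and the complete index lists of drops (>10) and stabilizations (<1) via comprehensions, then combines them (first drop, first stabilization index strictly after it), instead of A's single early-exit scan carrying a 'pick' state flag.
import Mathlib
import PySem

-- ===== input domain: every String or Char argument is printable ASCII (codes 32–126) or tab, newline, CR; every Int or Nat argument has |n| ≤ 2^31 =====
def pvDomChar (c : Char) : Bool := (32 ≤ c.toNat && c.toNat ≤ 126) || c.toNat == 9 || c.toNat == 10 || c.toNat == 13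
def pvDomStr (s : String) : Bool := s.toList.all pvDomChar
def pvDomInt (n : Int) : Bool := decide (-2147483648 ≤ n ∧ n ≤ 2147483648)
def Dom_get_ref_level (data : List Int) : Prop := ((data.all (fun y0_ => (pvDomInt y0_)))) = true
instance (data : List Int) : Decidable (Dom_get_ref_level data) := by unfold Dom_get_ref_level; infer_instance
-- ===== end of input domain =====

-- B materializes the adjacent-difference list and the full index lists of drops and
-- stabilizations, then combines them; A is a single early-exit scan with a state flag
-- (objective: alternative).

-- ===== PORT A =====
-- A's loop 'for i in range(1, len(data))' carrying the 'pick' flag; indices i-1, i are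
-- always in range for 1 ≤ i < len, so getD is exact here.
def pvALoop (data : List Int) (n i : Nat) (pick : Bool) : Option Int :=
  if _h : i < n then
    if pick = false then
      if data.getD (i-1) 0 - data.getD i 0 > 10 then pvALoop data n (i+1) true
      else pvALoop data n (i+1) false
    else
      if data.getD (i-1) 0 - data.getD i 0 < 1 then some (i : Int)
      else pvALoop data n (i+1) true
  else none
termination_by n - i

def get_ref_level (data : List Int) : Option Int :=
  pvALoop data data.length 1 false

-- ===== PORT B =====
-- 'i + 1' from the generator expression 'next((i + 1 for i in stables if i > first), None)'
def pvToOut (j : Nat) : Int := (j : Int) + 1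

-- diffs = [a - b for a, b in zip(data, data[1:])]; drops / stables are the full index
-- lists built by comprehension (enumerate ~ indices into diffs); then combine them.
def get_ref_level_alt (data : List Int) : Option Int :=
  let diffs := (data.zip data.tail).map (fun p => p.1 - p.2)
  let drops := (List.range diffs.length).filter (fun i => diffs.getD i 0 > 10)
  let stables := (List.range diffs.length).filter (fun i => diffs.getD i 0 < 1)
  match drops with
  | [] => none
  | first :: _ => (stables.find? (fun i => first < i)).map pvToOut

-- ===== PRECONDITION & SPEC =====
def Spec_get_ref_level (data : List Int) (out : Option Int) : Prop := out = get_ref_level_alt data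
instance (data : List Int) (out : Option Int) : Decidable (Spec_get_ref_level data out) := by unfold Spec_get_ref_level; infer_instance

-- ===== CLAIM =====
def Claim_equal_get_ref_level : Prop := ∀ (data : List Int), Dom_get_ref_level data → Spec_get_ref_level data (get_ref_level data)

-- ===== LEMMAS AND PROOFS =====

theorem pv_diffs_len (data : List Int) :
    ((data.zip data.tail).map (fun p : Int × Int => p.1 - p.2)).length = data.length - 1 := by
  rw [List.length_map, List.length_zip, List.length_tail]
  omega

theorem pv_diffs_getD (data : List Int) (i : Nat)
    (h : i < ((data.zip data.tail).map (fun p : Int × Int => p.1 - p.2)).length) :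
    ((data.zip data.tail).map (fun p : Int × Int => p.1 - p.2)).getD i 0
      = data.getD i 0 - data.getD (i+1) 0 := by
  have hm := pv_diffs_len data
  have hi : i < data.length := by omega
  have hi1 : i + 1 < data.length := by omega
  have ht : i < data.tail.length := by simp [List.length_tail]; omega
  rw [List.getD_eq_getElem _ _ h, List.getD_eq_getElem _ _ hi, List.getD_eq_getElem _ _ hi1]
  simp [List.getElem_zip, List.getElem_tail]

-- head? of a filter is find?
theorem pv_head?_filter {α : Type} (p : α → Bool) (l : List α) :
    (l.filter p).head? = l.find? p := by
  induction l with
  | nil => rfl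
  | cons a t ih =>
    by_cases h : p a <;> simp [h, ih]

-- find? on a filter fuses the predicates
theorem pv_find?_filter {α : Type} (p q : α → Bool) (l : List α) :
    (l.filter p).find? q = l.find? (fun a => p a && q a) := by
  induction l with
  | nil => rfl
  | cons a t ih =>
    by_cases hp : p a
    · by_cases hq : q a <;> simp [hp, hq, ih]
    · simp [hp, ih]

-- on a range entirely above f, the 'f < i' conjunct is vacuous
theorem pv_find?_above (q : Nat → Bool) (f : Nat) :
    ∀ len s, f < s →
      (List.range' s len).find? (fun i => q i && decide (f < i)) = (List.range' s len).find? q := by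
  intro len
  induction len with
  | zero => intro s _; rfl
  | succ k ih =>
    intro s hs
    rw [List.range'_succ]
    by_cases hq : q s <;>
      simp [hq, hs, ih (s+1) (by omega)]

-- dropping the prefix ≤ f of a range via the conjunct
theorem pv_find?_shift (q : Nat → Bool) (f : Nat) :
    ∀ len s, s ≤ f + 1 →
      (List.range' s len).find? (fun i => q i && decide (f < i))
        = (List.range' (f+1) (s + len - (f+1))).find? q := by
  intro len
  induction len with
  | zero =>
    intro s hs
    have h0 : s + 0 - (f+1) = 0 := by omega
    rw [h0]
    rfl
  | succ k ih =>
    intro s hs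
    by_cases hsf : s ≤ f
    · rw [List.range'_succ]
      have hlt : ¬ f < s := by omega
      have h2 : (s+1) + k - (f+1) = s + (k+1) - (f+1) := by omega
      simp only [List.find?_cons, hlt, decide_false, Bool.and_false]
      rw [ih (s+1) (by omega), h2]
    · have hse : s = f + 1 := by omega
      subst hse
      have h3 : (f+1) + (k+1) - (f+1) = k + 1 := by omega
      rw [h3, pv_find?_above q f (k+1) (f+1) (by omega)]

-- the 'pick = true' phase of A is find? of the stabilization predicate on a range of diff indices
theorem pv_aloop_true (data : List Int) :
    ∀ k i, k = (data.length - 1) - i →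
      pvALoop data data.length (i+1) true
        = ((List.range' i ((data.length - 1) - i)).find?
              (fun j => decide (((data.zip data.tail).map (fun p : Int × Int => p.1 - p.2)).getD j 0 < 1))).map pvToOut := by
  intro k
  induction k using Nat.strong_induction_on with
  | _ k ih =>
    intro i hk
    have hm := pv_diffs_len data
    rw [pvALoop]
    by_cases h : i + 1 < data.length
    · have hrange : (data.length - 1) - i = ((data.length - 1) - (i+1)) + 1 := by omega
      have hd := pv_diffs_getD data i (by omega)
      rw [hrange, List.range'_succ]
      simp only [dif_pos h, Bool.true_eq_false, if_false, Nat.add_sub_cancel]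
      by_cases hc : data.getD i 0 - data.getD (i+1) 0 < 1
      · rw [if_pos hc, List.find?_cons_of_pos (by simp only [decide_eq_true_eq, hd]; exact hc)]
        simp only [Option.map_some, pvToOut, Option.some_inj]
        push_cast
        ring
      · rw [if_neg hc, List.find?_cons_of_neg (by simp only [decide_eq_true_eq, hd]; exact hc)]
        exact ih ((data.length - 1) - (i+1)) (by omega) (i+1) rfl
    · have h0 : (data.length - 1) - i = 0 := by omega
      rw [h0]
      simp [h]

-- the 'pick = false' phase of A is find? of the drop predicate, then the true phase
theorem pv_aloop_false (data : List Int) :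
    ∀ k i, k = (data.length - 1) - i →
      pvALoop data data.length (i+1) false
        = (match (List.range' i ((data.length - 1) - i)).find?
              (fun j => decide (((data.zip data.tail).map (fun p : Int × Int => p.1 - p.2)).getD j 0 > 10)) with
           | none => none
           | some d =>
             ((List.range' (d+1) ((data.length - 1) - (d+1))).find?
                 (fun j => decide (((data.zip data.tail).map (fun p : Int × Int => p.1 - p.2)).getD j 0 < 1))).map pvToOut) := by
  intro k
  induction k using Nat.strong_induction_on with
  | _ k ih =>
    intro i hk
    have hm := pv_diffs_len data
    rw [pvALoop]
    by_cases h : i + 1 < data.length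
    · have hrange : (data.length - 1) - i = ((data.length - 1) - (i+1)) + 1 := by omega
      have hd := pv_diffs_getD data i (by omega)
      rw [hrange, List.range'_succ]
      simp only [dif_pos h, Nat.add_sub_cancel]
      by_cases hc : data.getD i 0 - data.getD (i+1) 0 > 10
      · rw [if_pos hc, List.find?_cons_of_pos (by simp only [decide_eq_true_eq, hd]; exact hc)]
        exact pv_aloop_true data ((data.length - 1) - (i+1)) (i+1) rfl
      · rw [if_neg hc, List.find?_cons_of_neg (by simp only [decide_eq_true_eq, hd]; exact hc)]
        exact ih ((data.length - 1) - (i+1)) (by omega) (i+1) rfl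
    · have h0 : (data.length - 1) - i = 0 := by omega
      rw [h0]
      simp [h]

-- ===== VERDICT =====
theorem get_ref_level_spec : Claim_equal_get_ref_level := by
  intro data _
  unfold Spec_get_ref_level get_ref_level get_ref_level_alt
  have hm := pv_diffs_len data
  have hA := pv_aloop_false data (data.length - 1) 0 (by omega)
  simp only [Nat.sub_zero] at hA
  rw [show (1 : Nat) = 0 + 1 from rfl, hA]
  dsimp only
  rw [List.range_eq_range', hm]
  cases hfind : (List.range' 0 (data.length - 1)).find?
      (fun j => decide (((data.zip data.tail).map (fun p : Int × Int => p.1 - p.2)).getD j 0 > 10)) with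
  | none =>
    have hnil : (List.range' 0 (data.length - 1)).filter
        (fun i => decide (((data.zip data.tail).map (fun p : Int × Int => p.1 - p.2)).getD i 0 > 10)) = [] := by
      rw [← List.head?_eq_none_iff, pv_head?_filter, hfind]
    rw [hnil]
  | some d =>
    have hhead : ((List.range' 0 (data.length - 1)).filter
        (fun i => decide (((data.zip data.tail).map (fun p : Int × Int => p.1 - p.2)).getD i 0 > 10))).head? = some d := by
      rw [pv_head?_filter, hfind]
    cases hfl : (List.range' 0 (data.length - 1)).filter
        (fun i => decide (((data.zip data.tail).map (fun p : Int × Int => p.1 - p.2)).getD i 0 > 10)) with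
    | nil => rw [hfl] at hhead; simp at hhead
    | cons f t =>
      rw [hfl] at hhead
      simp only [List.head?_cons, Option.some_inj] at hhead
      subst hhead
      dsimp only
      rw [pv_find?_filter, pv_find?_shift _ f (data.length - 1) 0 (by omega)]
      simp
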